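-- pv_equiv track=rewrite | github.com/wangboyang114514/wangboyang114514.github.io | translate_element_pages.py | translate_default
-- ===== SOURCE A (Python) =====
-- def translate_default(value):
--     # 确保输入值是字符串
--     if not isinstance(value, str):
--         return value
--
--     # 移除首尾空白字符和可能的换行符
--     value = value.strip().replace('\n', '').replace('\r', '')
--
--     translations = {
--         'No special hazard information': '无特殊危害信息',
--         'No CAS number': '无CAS号',
--         'No synonyms': '无同义词'
--     }
--
--     # 检查是否有完全匹配的翻译（不区分大小写）
--     value_lower = value.lower()
--     for en, zh in translations.items():
--         if value_lower == en.lower():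
--             return zh
--
--     # 如果没有完全匹配，尝试部分匹配
--     if 'no special hazard information' in value_lower:
--         return '无特殊危害信息'
--     if 'no cas number' in value_lower:
--         return '无CAS号'
--     if 'no synonyms' in value_lower:
--         return '无同义词'
--
--     return value
-- ===== SOURCE B (Python) =====
-- PHRASES = [
--     ('no special hazard information', '无特殊危害信息'),
--     ('no cas number', '无CAS号'),
--     ('no synonyms', '无同义词'),
-- ]
--
-- def translate_default(value):
--     if not isinstance(value, str):
--         return value
--     value = value.strip().replace('\n', '').replace('\r', '')
--     value_lower = value.lower()
--     for phrase, zh in PHRASES: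
--         if phrase in value_lower:
--             return zh
--     return value
-- ===== Notes on version B (the rewrite author's own statement) =====
-- stated objective: simpler
-- what changed: Replaces A's two-phase logic (exact-match loop over a dict, then three hardcoded substring ifs) by one pass over a single ordered phrase table using substring containment, since exact equality implies containment with the same priority order.
import Mathlib
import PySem

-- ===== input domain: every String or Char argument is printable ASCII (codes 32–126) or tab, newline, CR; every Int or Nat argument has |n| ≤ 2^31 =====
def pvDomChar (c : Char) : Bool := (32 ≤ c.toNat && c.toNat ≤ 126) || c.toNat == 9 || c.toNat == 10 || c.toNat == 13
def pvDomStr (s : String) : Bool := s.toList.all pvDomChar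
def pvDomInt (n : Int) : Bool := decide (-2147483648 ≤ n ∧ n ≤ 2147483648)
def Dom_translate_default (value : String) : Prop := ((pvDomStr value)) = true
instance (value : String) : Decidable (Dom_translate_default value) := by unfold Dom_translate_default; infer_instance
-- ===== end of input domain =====

-- B merges A's two phases (exact-match loop over a dict, then three hardcoded substring ifs)
-- into one pass over a single ordered phrase table using substring containment: simpler, same cost.

-- ===== PORT A =====
def translate_default (value : String) : String :=
  let v := PySem.Str.replace (PySem.Str.replace (PySem.Str.strip value) "\n" "") "\r" ""
  let translations : PySem.Dict String String :=
    PySem.Dict.ofList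
      [("No special hazard information", "无特殊危害信息"),
       ("No CAS number", "无CAS号"),
       ("No synonyms", "无同义词")]
  let value_lower := PySem.Str.lower v
  -- 'for en, zh in translations.items(): if value_lower == en.lower(): return zh'
  match translations.items.find? (fun p => value_lower == PySem.Str.lower p.1) with
  | some p => p.2
  | none =>
    if PySem.Str.isIn "no special hazard information" value_lower then "无特殊危害信息"
    else if PySem.Str.isIn "no cas number" value_lower then "无CAS号"
    else if PySem.Str.isIn "no synonyms" value_lower then "无同义词"
    else v

-- ===== PORT B =====
def pvPhrases : List (String × String) :=
  [("no special hazard information", "无特殊危害信息"),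
   ("no cas number", "无CAS号"),
   ("no synonyms", "无同义词")]

def translate_default_alt (value : String) : String :=
  let v := PySem.Str.replace (PySem.Str.replace (PySem.Str.strip value) "\n" "") "\r" ""
  let value_lower := PySem.Str.lower v
  match pvPhrases.find? (fun p => PySem.Str.isIn p.1 value_lower) with
  | some p => p.2
  | none => v

-- ===== PRECONDITION & SPEC =====
def Spec_translate_default (value : String) (out : String) : Prop := out = translate_default_alt value
instance (value : String) (out : String) : Decidable (Spec_translate_default value out) := by unfold Spec_translate_default; infer_instance

-- ===== CLAIM (what is proved, stated in full; the proofs are below) =====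
def Claim_equal_translate_default : Prop := ∀ (value : String), Dom_translate_default value → Spec_translate_default value (translate_default value)

-- ===== LEMMAS AND PROOFS =====

-- ===== VERDICT (by name: the statement is the Claim_ definition above) =====
theorem translate_default_spec : Claim_equal_translate_default := by
  intro value _
  unfold Spec_translate_default translate_default translate_default_alt pvPhrases
  simp only
  set w := PySem.Str.lower (PySem.Str.replace (PySem.Str.replace (PySem.Str.strip value) "\n" "") "\r" "") with hw
  by_cases h1 : w = "no special hazard information"
  · rw [h1]; rfl
  · by_cases h2 : w = "no cas number"
    · rw [h2]; rfl
    · by_cases h3 : w = "no synonyms"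
      · rw [h3]; rfl
      · have e : (PySem.Dict.ofList
            [("No special hazard information", "无特殊危害信息"), ("No CAS number", "无CAS号"),
              ("No synonyms", "无同义词")] : PySem.Dict String String).items =
            [("No special hazard information", "无特殊危害信息"), ("No CAS number", "无CAS号"),
              ("No synonyms", "无同义词")] := rfl
        rw [e]
        have l1 : PySem.Str.lower "No special hazard information" = "no special hazard information" := rfl
        have l2 : PySem.Str.lower "No CAS number" = "no cas number" := rfl
        have l3 : PySem.Str.lower "No synonyms" = "no synonyms" := rfl
        simp only [List.find?, l1, l2, l3]
        rw [beq_false_of_ne h1, beq_false_of_ne h2, beq_false_of_ne h3]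
        cases PySem.Str.isIn "no special hazard information" w <;>
          cases PySem.Str.isIn "no cas number" w <;>
            cases PySem.Str.isIn "no synonyms" w <;> rfl
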